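-- pv_equiv track=rewrite | github.com/pypi-data/pypi-mirror-377 | packages/pirateweather-translations/pirateweather_translations-1.3.0.tar.gz/pirateweather_translations-1.3.0/pirateweather_translations/lang/ru.py | join_with_shared_prefix
-- ===== SOURCE A (Python) =====
-- def join_with_shared_prefix(a, b, joiner):
--     m = a
--     i = 0
--
--     # HACK: This replicates the JS logic.
--     if m == "today" or m == "tomorrow":
--         m = "on " + m
--
--     # Skip the prefix of b that is shared with a.
--     min_len = min(len(m), len(b))
--     while i < min_len and ord(m[i]) == ord(b[i]):
--         i += 1
--
--     # ...except whitespace! We need that whitespace!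
--     # Move back until we hit a space or start of string
--     while i > 0 and (i > len(b) or (i <= len(b) and b[i - 1] != " ")):
--         i -= 1
--
--     return a + joiner + b[i:]
-- ===== SOURCE B (Python) =====
-- def join_with_shared_prefix(a, b, joiner):
--     m = a
--     if m == "today" or m == "tomorrow":
--         m = "on " + m
--     # Single forward pass: track the cut point just past the last space
--     # inside the common word-aligned prefix of m and b.
--     cut = 0
--     for idx, (x, y) in enumerate(zip(m, b)):
--         if x != y:
--             break
--         if x == " ":
--             cut = idx + 1
--     return a + joiner + b[cut:]
-- ===== Notes on version B (the rewrite author's own statement) =====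
-- stated objective: simpler
-- what changed: Replaces A's two-pass logic (forward common-prefix scan, then a backward scan to the previous space) with one forward pass over zip(m,b) that remembers the position just past the last matched space.
import Mathlib
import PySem

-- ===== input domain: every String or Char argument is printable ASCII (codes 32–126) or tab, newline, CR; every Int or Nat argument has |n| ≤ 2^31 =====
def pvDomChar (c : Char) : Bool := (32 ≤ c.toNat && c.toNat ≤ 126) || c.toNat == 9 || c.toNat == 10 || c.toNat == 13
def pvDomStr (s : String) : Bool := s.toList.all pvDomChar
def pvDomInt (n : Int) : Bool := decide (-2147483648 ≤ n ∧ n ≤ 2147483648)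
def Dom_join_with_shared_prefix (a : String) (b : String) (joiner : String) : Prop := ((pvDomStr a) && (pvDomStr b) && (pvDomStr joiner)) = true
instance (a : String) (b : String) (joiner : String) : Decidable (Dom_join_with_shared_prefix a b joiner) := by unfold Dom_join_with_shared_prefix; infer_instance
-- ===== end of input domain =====

-- B replaces A's two passes (forward common-prefix scan, backward scan to a space)
-- with one forward pass that remembers the position just past the last matched space (objective: simpler).

-- ===== PORT A =====
-- forward while loop: length of the common character prefix of m and b
def pvMatchLen : List Char → List Char → Nat
  | _, [] => 0
  | [], _ => 0
  | x :: xs, y :: ys => if x = y then pvMatchLen xs ys + 1 else 0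

-- backward while loop: while i > 0 and (i > len(b) or (i <= len(b) and b[i-1] != " ")): i -= 1
def pvBack (bc : List Char) : Nat → Nat
  | 0 => 0
  | i + 1 =>
    if i + 1 > bc.length ∨ (i + 1 ≤ bc.length ∧ bc.getD i ' ' ≠ ' ') then pvBack bc i
    else i + 1

def join_with_shared_prefix (a : String) (b : String) (joiner : String) : String :=
  let m := if a = "today" ∨ a = "tomorrow" then "on " ++ a else a
  let i := pvBack b.toList (pvMatchLen m.toList b.toList)
  a ++ joiner ++ String.ofList (b.toList.drop i)

-- ===== PORT B =====
-- single forward pass over zip(m, b) with index and cut accumulator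
def pvAltLoop : List (Char × Char) → Nat → Nat → Nat
  | [], _, cut => cut
  | (x, y) :: rest, idx, cut =>
    if x ≠ y then cut
    else pvAltLoop rest (idx + 1) (if x = ' ' then idx + 1 else cut)

def join_with_shared_prefix_alt (a : String) (b : String) (joiner : String) : String :=
  let m := if a = "today" ∨ a = "tomorrow" then "on " ++ a else a
  let cut := pvAltLoop (m.toList.zip b.toList) 0 0
  a ++ joiner ++ String.ofList (b.toList.drop cut)

-- ===== PRECONDITION & SPEC =====
def Spec_join_with_shared_prefix (a : String) (b : String) (joiner : String) (out : String) : Prop := out = join_with_shared_prefix_alt a b joiner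
instance (a : String) (b : String) (joiner : String) (out : String) : Decidable (Spec_join_with_shared_prefix a b joiner out) := by unfold Spec_join_with_shared_prefix; infer_instance

-- ===== CLAIM (what is proved, stated in full; the proofs are below) =====
def Claim_equal_join_with_shared_prefix : Prop := ∀ (a : String) (b : String) (joiner : String), Dom_join_with_shared_prefix a b joiner → Spec_join_with_shared_prefix a b joiner (join_with_shared_prefix a b joiner)

-- ===== LEMMAS AND PROOFS =====

-- Invariant of the single forward pass: starting after an already-consumed prefix `pre`
-- of b with the correct accumulator, it lands where A's backward loop lands.
theorem pvAltLoop_inv (xs : List Char) : ∀ (ys pre : List Char),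
    pvAltLoop (xs.zip ys) pre.length (pvBack (pre ++ ys) pre.length)
      = pvBack (pre ++ ys) (pre.length + pvMatchLen xs ys) := by
  induction xs with
  | nil => intro ys pre; cases ys <;> simp [pvAltLoop, pvMatchLen]
  | cons x xs ih =>
    intro ys pre
    cases ys with
    | nil => simp [pvAltLoop, pvMatchLen]
    | cons y ys =>
      by_cases hxy : x = y
      · subst hxy
        have hlen : pre.length + 1 ≤ (pre ++ x :: ys).length := by simp
        have hget : (pre ++ x :: ys).getD pre.length ' ' = x := by
          simp [List.getD]
        have hstep : (if x = ' ' then pre.length + 1 else pvBack (pre ++ x :: ys) pre.length)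
            = pvBack (pre ++ x :: ys) (pre.length + 1) := by
          by_cases hsp : x = ' '
          · simp [pvBack, hsp]
          · simp [pvBack, hsp]
        have key := ih ys (pre ++ [x])
        simp only [List.append_assoc, List.cons_append, List.nil_append,
          List.length_append, List.length_cons, List.length_nil] at key
        simp only [List.zip_cons_cons, pvAltLoop, pvMatchLen, ne_eq, not_true_eq_false,
          ite_false]
        rw [hstep]
        simpa [Nat.add_comm, Nat.add_assoc, Nat.add_left_comm] using key
      · simp [pvAltLoop, pvMatchLen, hxy]

theorem pvAltLoop_eq (xs ys : List Char) :
    pvAltLoop (xs.zip ys) 0 0 = pvBack ys (pvMatchLen xs ys) := by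
  have h := pvAltLoop_inv xs ys []
  simpa [pvBack] using h

-- ===== VERDICT (by name: the statement is the Claim_ definition above) =====
theorem join_with_shared_prefix_spec : Claim_equal_join_with_shared_prefix := by
  intro a b joiner _
  simp only [Spec_join_with_shared_prefix, join_with_shared_prefix, join_with_shared_prefix_alt,
    pvAltLoop_eq]
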